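-- pv_equiv track=rewrite | github.com/MarcoRoma96/NCD-agenda-outpatients | src/collect4cut.py | delete_overlapping
-- ===== SOURCE A (Python) =====
-- def delete_overlapping(combination_l:list):
--     new_comb_l=[]
--     for l in combination_l:
--         remove=False
--         for i in range(len(l)-1):
--             for j in range(i+1,len(l)):
--                 if l[i][0]==l[j][0] and any(prest in l[i][1] for prest in l[j][1]):
--                     remove=True
--                     break
--             if remove:
--                 break
--         if not remove:
--             new_comb_l.append(l)
--     return new_comb_l
-- ===== SOURCE B (Python) =====
-- def delete_overlapping(combination_l: list):
--     result = []
--     for comb in combination_l: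
--         seen = {}
--         ok = True
--         for key, elems in comb:
--             s = seen.get(key, set())
--             if any(e in s for e in elems):
--                 ok = False
--                 break
--             seen[key] = s | set(elems)
--         if ok:
--             result.append(comb)
--     return result
-- ===== Notes on version B (the rewrite author's own statement) =====
-- stated objective: alternative
-- what changed: Replaces A's triple-nested index loop comparing every pair of same-key items element-by-element with a single pass per combination that maintains a dict from key to the set of elements already seen, detecting overlap by set membership.
import Mathlib
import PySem

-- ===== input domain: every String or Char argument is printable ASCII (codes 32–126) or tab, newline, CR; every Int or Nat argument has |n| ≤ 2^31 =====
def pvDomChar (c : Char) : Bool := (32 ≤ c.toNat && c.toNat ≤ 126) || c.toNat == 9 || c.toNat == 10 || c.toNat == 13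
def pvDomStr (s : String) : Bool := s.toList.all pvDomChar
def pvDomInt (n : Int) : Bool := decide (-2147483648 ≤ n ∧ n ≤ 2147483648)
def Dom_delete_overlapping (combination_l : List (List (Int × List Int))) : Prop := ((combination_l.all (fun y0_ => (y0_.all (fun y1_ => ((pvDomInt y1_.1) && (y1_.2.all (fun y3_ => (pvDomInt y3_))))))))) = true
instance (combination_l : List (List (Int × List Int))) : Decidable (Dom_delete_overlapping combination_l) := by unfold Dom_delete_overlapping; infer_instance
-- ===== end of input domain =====

-- B replaces A's pairwise same-key overlap scan with one pass per combination over a dict of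
-- per-key seen-element sets (objective: alternative). Neither version mutates its argument.

-- ===== PORT A =====
-- inner `for j in range(i+1, len(l))` loop with its break (returns the `remove` it would set)
def pvInnerA (l : List (Int × List Int)) (i : Int) : List Int → Bool
  | [] => false
  | j :: js =>
      let li := PySem.List.pyGetD l i (0, [])
      let lj := PySem.List.pyGetD l j (0, [])
      if li.1 == lj.1 && lj.2.any (fun prest => li.2.contains prest) then true
      else pvInnerA l i js

-- outer `for i in range(len(l)-1)` loop with its break; returns the final `remove`
def pvOuterA (l : List (Int × List Int)) : List Int → Bool
  | [] => false
  | i :: is =>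
      if pvInnerA l i (PySem.List.pyRange (i + 1) (l.length : Int) 1) then true
      else pvOuterA l is

def pvRemoveA (l : List (Int × List Int)) : Bool :=
  pvOuterA l (PySem.List.pyRange 0 ((l.length : Int) - 1) 1)

def delete_overlapping (combination_l : List (List (Int × List Int))) : List (List (Int × List Int)) :=
  combination_l.foldl (fun new_comb_l l => if pvRemoveA l then new_comb_l else new_comb_l ++ [l]) []

-- ===== PORT B =====
-- one pass over a combination: `seen` maps key -> set of elements already seen under that key;
-- returns the final `ok` (breaks at the first overlap)
def pvScanB (seen : PySem.Dict Int (PySem.Set Int)) : List (Int × List Int) → Bool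
  | [] => true
  | (key, elems) :: rest =>
      let s := seen.getD key PySem.Set.empty
      if elems.any (fun e => PySem.Set.contains s e) then false
      else pvScanB (seen.insert key (PySem.Set.union s elems)) rest

def delete_overlapping_alt (combination_l : List (List (Int × List Int))) : List (List (Int × List Int)) :=
  combination_l.foldl (fun result comb => if pvScanB PySem.Dict.empty comb then result ++ [comb] else result) []

-- ===== PRECONDITION & SPEC =====
def Spec_delete_overlapping (combination_l : List (List (Int × List Int))) (out : List (List (Int × List Int))) : Prop := out = delete_overlapping_alt combination_l
instance (combination_l : List (List (Int × List Int))) (out : List (List (Int × List Int))) : Decidable (Spec_delete_overlapping combination_l out) := by unfold Spec_delete_overlapping; infer_instance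

-- ===== CLAIM (what is proved, stated in full; the proofs are below) =====
def Claim_equal_delete_overlapping : Prop := ∀ (combination_l : List (List (Int × List Int))), Dom_delete_overlapping combination_l → Spec_delete_overlapping combination_l (delete_overlapping combination_l)

-- ===== LEMMAS AND PROOFS =====

-- structural characterisation of "some earlier item shares its key with a later item and their element
-- lists intersect" (the condition both programs decide per combination)
def pvPair (l : List (Int × List Int)) : Bool :=
  match l with
  | [] => false
  | x :: rest =>
      (rest.any (fun y => x.1 == y.1 && y.2.any (fun p => x.2.contains p))) || pvPair rest

-- cross term of B's scan: some item of `rest` overlaps the set `seen` already holds for its key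
def pvCross (seen : PySem.Dict Int (PySem.Set Int)) (rest : List (Int × List Int)) : Bool :=
  rest.any (fun y => y.2.any (fun e => PySem.Set.contains (seen.getD y.1 PySem.Set.empty) e))

theorem pvPair_short (l : List (Int × List Int)) (h : l.length ≤ 1) : pvPair l = false := by
  match l, h with
  | [], _ => rfl
  | [x], _ => simp [pvPair]

theorem innerA_eq (l : List (Int × List Int)) (i : Int) :
    ∀ (n : Nat) (j : Int), 0 ≤ j → l.length ≤ j.toNat + n →
      pvInnerA l i (PySem.List.pyRange j (l.length : Int) 1)
        = (l.drop j.toNat).any (fun y =>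
            (PySem.List.pyGetD l i (0, [])).1 == y.1 &&
            y.2.any (fun p => (PySem.List.pyGetD l i (0, [])).2.contains p)) := by
  intro n
  induction n with
  | zero =>
      intro j hj hlen
      rw [PySem.List.pyRange_one_eq_nil (by omega), List.drop_eq_nil_of_le (by omega)]
      rfl
  | succ n ih =>
      intro j hj hlen
      by_cases hlt : j < (l.length : Int)
      · have hjn : j.toNat < l.length := by omega
        rw [PySem.List.pyRange_one_cons hlt, ← List.getElem_cons_drop hjn]
        simp only [pvInnerA, List.any_cons]
        rw [PySem.List.pyGetD_of_nonneg l (0, []) hj, List.getD_eq_getElem l (0, []) hjn]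
        have hnat : (j + 1).toNat = j.toNat + 1 := by omega
        rw [ih (j + 1) (by omega) (by omega), hnat]
        cases hc : ((PySem.List.pyGetD l i (0, [])).1 == l[j.toNat].1 &&
            l[j.toNat].2.any fun prest => (PySem.List.pyGetD l i (0, [])).2.contains prest) <;>
          simp
      · rw [PySem.List.pyRange_one_eq_nil (by omega), List.drop_eq_nil_of_le (by omega)]
        rfl

theorem outerA_eq (l : List (Int × List Int)) :
    ∀ (n : Nat) (j : Int), 0 ≤ j → l.length ≤ j.toNat + n →
      pvOuterA l (PySem.List.pyRange j ((l.length : Int) - 1) 1) = pvPair (l.drop j.toNat) := by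
  intro n
  induction n with
  | zero =>
      intro j hj hlen
      rw [PySem.List.pyRange_one_eq_nil (by omega),
        pvPair_short _ (by simp [List.length_drop]; omega)]
      rfl
  | succ n ih =>
      intro j hj hlen
      by_cases hlt : j < (l.length : Int) - 1
      · have hjn : j.toNat < l.length := by omega
        rw [PySem.List.pyRange_one_cons hlt]
        simp only [pvOuterA]
        rw [innerA_eq l j (l.length) (j + 1) (by omega) (by omega)]
        have hnat : (j + 1).toNat = j.toNat + 1 := by omega
        rw [hnat]
        conv_rhs => rw [← List.getElem_cons_drop hjn]
        simp only [pvPair]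
        rw [PySem.List.pyGetD_of_nonneg l (0, []) hj, List.getD_eq_getElem l (0, []) hjn]
        cases hc : ((l.drop (j.toNat + 1)).any fun y =>
            l[j.toNat].1 == y.1 && y.2.any fun p => l[j.toNat].2.contains p)
        · simp only [Bool.false_or]
          exact ih (j + 1) (by omega) (by omega) |>.trans (by rw [hnat])
        · simp
      · rw [PySem.List.pyRange_one_eq_nil (by omega),
          pvPair_short _ (by simp [List.length_drop]; omega)]
        rfl

theorem pvSet_contains_iff (s : PySem.Set Int) (e : Int) :
    PySem.Set.contains s e = true ↔ e ∈ s := by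
  simp [PySem.Set.contains]

theorem cross_insert (seen : PySem.Dict Int (PySem.Set Int)) (k : Int) (es : List Int)
    (rs : List (Int × List Int)) :
    pvCross (seen.insert k (PySem.Set.union (seen.getD k PySem.Set.empty) es)) rs
      = (pvCross seen rs || rs.any (fun y => k == y.1 && y.2.any (fun p => es.contains p))) := by
  rw [Bool.eq_iff_iff]
  simp only [pvCross, List.any_eq_true, Bool.or_eq_true, Bool.and_eq_true, beq_iff_eq,
    pvSet_contains_iff, List.contains_eq_mem, decide_eq_true_eq, PySem.Dict.getD_insert]
  constructor
  · rintro ⟨y, hy, e, he, hmem⟩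
    by_cases h : y.1 = k
    · rw [if_pos h] at hmem
      rcases (PySem.Set.mem_union _ _ _).mp hmem with h1 | h2
      · exact Or.inl ⟨y, hy, e, he, by rw [h]; exact h1⟩
      · exact Or.inr ⟨y, hy, h.symm, e, he, h2⟩
    · rw [if_neg h] at hmem
      exact Or.inl ⟨y, hy, e, he, hmem⟩
  · rintro (⟨y, hy, e, he, hmem⟩ | ⟨y, hy, hk, e, he, hes⟩)
    · refine ⟨y, hy, e, he, ?_⟩
      by_cases h : y.1 = k
      · rw [if_pos h]
        exact (PySem.Set.mem_union _ _ _).mpr (Or.inl (by rw [← h]; exact hmem))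
      · rw [if_neg h]; exact hmem
    · exact ⟨y, hy, e, he, by
        rw [if_pos hk.symm]
        exact (PySem.Set.mem_union _ _ _).mpr (Or.inr hes)⟩

theorem scanB_eq :
    ∀ (rest : List (Int × List Int)) (seen : PySem.Dict Int (PySem.Set Int)),
      pvScanB seen rest = !(pvCross seen rest || pvPair rest) := by
  intro rest
  induction rest with
  | nil => intro seen; simp [pvScanB, pvCross, pvPair]
  | cons x rs ih =>
      obtain ⟨k, es⟩ := x
      intro seen
      simp only [pvScanB]
      cases hhit : es.any (fun e => PySem.Set.contains (seen.getD k PySem.Set.empty) e)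
      · simp only [Bool.false_eq_true, if_false]
        rw [ih, cross_insert]
        simp only [pvCross, pvPair, List.any_cons, hhit]
        cases h1 : pvCross seen rs <;>
          cases h2 : rs.any (fun y => k == y.1 && y.2.any fun p => es.contains p) <;>
          cases h3 : pvPair rs <;>
          simp
      · have hcr : pvCross seen ((k, es) :: rs) = true := by
          simp only [pvCross, List.any_cons, hhit, Bool.true_or]
        rw [hcr]
        simp

theorem cross_empty (comb : List (Int × List Int)) : pvCross PySem.Dict.empty comb = false := by
  simp [pvCross, PySem.Dict.getD_empty, PySem.Set.empty]

theorem removeA_eq_pair (l : List (Int × List Int)) : pvRemoveA l = pvPair l := by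
  have h := outerA_eq l l.length 0 le_rfl (by omega)
  simpa [pvRemoveA] using h

theorem scanB_empty (comb : List (Int × List Int)) :
    pvScanB PySem.Dict.empty comb = !pvRemoveA comb := by
  rw [scanB_eq, cross_empty, removeA_eq_pair, Bool.false_or]

theorem foldl_eq (cl : List (List (Int × List Int))) :
    ∀ acc, cl.foldl (fun new_comb_l l => if pvRemoveA l then new_comb_l else new_comb_l ++ [l]) acc
      = cl.foldl (fun result comb => if pvScanB PySem.Dict.empty comb then result ++ [comb] else result) acc := by
  induction cl with
  | nil => intro acc; rfl
  | cons l cl ih =>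
      intro acc
      simp only [List.foldl_cons]
      rw [scanB_empty l]
      cases hr : pvRemoveA l <;> simp [ih]

-- ===== VERDICT (by name: the statement is the Claim_ definition above) =====
theorem delete_overlapping_spec : Claim_equal_delete_overlapping := by
  intro combination_l _
  unfold Spec_delete_overlapping delete_overlapping delete_overlapping_alt
  exact foldl_eq combination_l []
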